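-- pv_equiv track=rewrite | github.com/pypi-data/pypi-mirror-310 | packages/xython/xython-3.2.1-py3-none-any.whl/xython/youtil.py | change_text_to_list_1d_by_step
-- ===== SOURCE A (Python) =====
-- def change_text_to_list_1d_by_step(input_data, input_list):
-- 	"""
-- 	입력문자를 숫자만큼씨 짤라서 리스트로 만드는 것
--
-- 	:param input_data:
-- 	:param input_list:
-- 	:return:
-- 	"""
-- 	result = []
-- 	total_len = 0
-- 	start_no = 0
-- 	for no in range(len(input_list)):
-- 		if no != 0:
-- 			start_no = total_len
-- 		end_len = input_list[no]
-- 		result.append(input_data[start_no:start_no + end_len])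
-- 		total_len = total_len + end_len
-- 	return result
-- ===== SOURCE B (Python) =====
-- def change_text_to_list_1d_by_step(input_data, input_list):
--     # Reverse traversal: start from the total length and walk the step list
--     # backwards, subtracting each step to recover that chunk's start offset;
--     # chunks are collected back-to-front and reversed at the end.
--     result = []
--     t = sum(input_list)
--     for s in reversed(input_list):
--         t -= s
--         result.append(input_data[t:t + s])
--     result.reverse()
--     return result
-- ===== Notes on version B (the rewrite author's own statement) =====
-- stated objective: alternative
-- what changed: B replaces A's forward loop with a running offset and first-iteration branch by a reverse traversal: it starts from sum(input_list), walks the step list backwards subtracting each step to recover chunk starts, collects chunks back-to-front and reverses the result.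
import Mathlib
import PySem

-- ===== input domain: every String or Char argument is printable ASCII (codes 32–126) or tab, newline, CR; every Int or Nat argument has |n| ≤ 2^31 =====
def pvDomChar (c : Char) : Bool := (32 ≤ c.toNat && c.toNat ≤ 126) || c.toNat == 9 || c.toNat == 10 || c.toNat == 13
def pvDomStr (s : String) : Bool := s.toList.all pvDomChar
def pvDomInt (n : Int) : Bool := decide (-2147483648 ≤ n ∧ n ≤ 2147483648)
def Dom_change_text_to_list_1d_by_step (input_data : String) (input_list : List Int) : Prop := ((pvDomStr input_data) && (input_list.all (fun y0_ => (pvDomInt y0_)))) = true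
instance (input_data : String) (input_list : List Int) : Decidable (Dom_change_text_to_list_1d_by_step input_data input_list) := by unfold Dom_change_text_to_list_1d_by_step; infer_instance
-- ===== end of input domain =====

-- B replaces A's forward loop (running offset + first-iteration branch) by a reverse
-- traversal: from sum(input_list) it walks the steps backwards, subtracting to recover
-- each chunk's start, building the output back-to-front and reversing at the end.


-- ===== PORT A =====
-- 'for no in range(len(input_list))' with 'input_list[no]' iterated as enumerate;
-- state (result, total_len, start_no), branch 'if no != 0: start_no = total_len' kept.
def change_text_to_list_1d_by_step (input_data : String) (input_list : List Int) : List String :=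
  ((PySem.List.enumerate input_list 0).foldl
    (fun (st : List String × Int × Int) (p : Int × Int) =>
      let start_no := if p.1 ≠ 0 then st.2.1 else st.2.2
      let end_len := p.2
      (st.1 ++ [PySem.Str.slice input_data (some start_no) (some (start_no + end_len))],
       st.2.1 + end_len, start_no))
    ([], 0, 0)).1

-- ===== PORT B =====
-- t = sum(input_list); for s in reversed(input_list): t -= s; append data[t:t+s];
-- finally result.reverse().
def change_text_to_list_1d_by_step_alt (input_data : String) (input_list : List Int) : List String :=
  let st := input_list.reverse.foldl
    (fun (st : List String × Int) (s : Int) =>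
      let t := st.2 - s
      (st.1 ++ [PySem.Str.slice input_data (some t) (some (t + s))], t))
    ([], input_list.sum)
  st.1.reverse

-- ===== PRECONDITION & SPEC =====
def Spec_change_text_to_list_1d_by_step (input_data : String) (input_list : List Int) (out : List String) : Prop := out = change_text_to_list_1d_by_step_alt input_data input_list
instance (input_data : String) (input_list : List Int) (out : List String) : Decidable (Spec_change_text_to_list_1d_by_step input_data input_list out) := by unfold Spec_change_text_to_list_1d_by_step; infer_instance

-- ===== CLAIM (what is proved, stated in full; the proofs are below) =====
def Claim_equal_change_text_to_list_1d_by_step : Prop := ∀ (input_data : String) (input_list : List Int), Dom_change_text_to_list_1d_by_step input_data input_list → Spec_change_text_to_list_1d_by_step input_data input_list (change_text_to_list_1d_by_step input_data input_list)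

-- ===== LEMMAS AND PROOFS =====
-- reference: the list of chunks starting at offset t
def pvChunks (d : String) : Int → List Int → List String
  | _, [] => []
  | t, s :: xs => PySem.Str.slice d (some t) (some (t + s)) :: pvChunks d (t + s) xs

-- A: from index 1 onward the branch always fires, so A computes pvChunks
theorem pvA_tail (d : String) (xs : List Int) :
    ∀ (s : Int), 1 ≤ s → ∀ (res : List String) (total start : Int),
    ((PySem.List.enumerate xs s).foldl
      (fun (st : List String × Int × Int) (p : Int × Int) =>
        (st.1 ++ [PySem.Str.slice d (some (if p.1 ≠ 0 then st.2.1 else st.2.2))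
                    (some ((if p.1 ≠ 0 then st.2.1 else st.2.2) + p.2))],
         st.2.1 + p.2, if p.1 ≠ 0 then st.2.1 else st.2.2))
      (res, total, start)).1
    = res ++ pvChunks d total xs := by
  induction xs with
  | nil => intro s hs res total start; simp [PySem.List.enumerate_nil, pvChunks]
  | cons x xs ih =>
    intro s hs res total start
    rw [PySem.List.enumerate_cons]
    simp only [List.foldl_cons, pvChunks]
    have hne : s ≠ 0 := by omega
    rw [if_pos hne]
    rw [ih (s + 1) (by omega)]
    simp

-- B: the reverse fold started at c + xs.sum yields the reversed chunks from offset c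
theorem pvB_loop (d : String) (xs : List Int) :
    ∀ (res : List String) (c : Int),
    xs.reverse.foldl
      (fun (st : List String × Int) (s : Int) =>
        (st.1 ++ [PySem.Str.slice d (some (st.2 - s)) (some (st.2 - s + s))], st.2 - s))
      (res, c + xs.sum)
    = (res ++ (pvChunks d c xs).reverse, c) := by
  induction xs with
  | nil => intro res c; simp [pvChunks]
  | cons x xs ih =>
    intro res c
    simp only [List.reverse_cons, List.foldl_append, List.sum_cons]
    have h : c + (x + xs.sum) = (c + x) + xs.sum := by ring
    rw [h, ih res (c + x)]
    simp only [List.foldl_cons, List.foldl_nil, pvChunks, List.reverse_cons, List.append_assoc]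
    norm_num

-- ===== VERDICT (by name: the statement is the Claim_ definition above) =====
theorem change_text_to_list_1d_by_step_spec : Claim_equal_change_text_to_list_1d_by_step := by
  intro input_data input_list _
  unfold Spec_change_text_to_list_1d_by_step change_text_to_list_1d_by_step change_text_to_list_1d_by_step_alt
  show _ = (input_list.reverse.foldl
      (fun (st : List String × Int) (s : Int) =>
        (st.1 ++ [PySem.Str.slice input_data (some (st.2 - s)) (some (st.2 - s + s))], st.2 - s))
      ([], input_list.sum)).1.reverse
  have hB := pvB_loop input_data input_list [] 0
  rw [zero_add] at hB
  rw [hB]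
  simp only [List.nil_append, List.reverse_reverse]
  -- A side
  cases input_list with
  | nil => simp [PySem.List.enumerate_nil, pvChunks]
  | cons x xs =>
    simp only [PySem.List.enumerate_cons, List.foldl_cons]
    rw [if_neg (by simp)]
    rw [pvA_tail input_data xs (0 + 1) (by norm_num)]
    simp [pvChunks]
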